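-- pv_equiv track=rewrite | github.com/marwanviper/mindCloudMyVersion | task2/task2.py | maximizeIt
-- ===== SOURCE A (Python) =====
-- def func(x):
--     """
--     This function takes one arguments x and returns its power of two.
--     """
--     return x**2
--
-- def maximizeIt(arrays, M):
--     # Apply func to every element in each list
--     for idx in range(len(arrays)):
--         arrays[idx] = list(map(func, arrays[idx]))
--
--     # Start with remainder 0
--     reachable = {0}
--
--     # this will get me all possible remainders and i can get the max in the end it takes frist the len loop of arrays
--     # and then the second loop of the values in the set
--     # finally through each array and calculate reachable remainders
--     for arr in arrays:
--         new_reachable = set()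
--         for r in reachable:
--             for val in arr:
--                 new_reachable.add((r + val) % M)
--         reachable = new_reachable
--
--     return max(reachable)
-- ===== SOURCE B (Python) =====
-- def maximizeIt(arrays, M):
--     # same in-place squaring as A so argument mutation matches
--     for idx in range(len(arrays)):
--         arrays[idx] = [x * x for x in arrays[idx]]
--
--     # brute-force: enumerate every one-per-list sum, mod once at the end
--     sums = [0]
--     for arr in arrays:
--         sums = [s + v for s in sums for v in arr]
--     return max(x % M for x in sums)
-- ===== Notes on version B (the rewrite author's own statement) =====
-- stated objective: alternative
-- what changed: Replaces the remainder-set dynamic programming (a set of residues updated per list) with a brute-force enumeration of every one-element-per-list sum, taking the modulus once at the end; the in-place squaring of the argument is kept. Pre_ excludes M = 0 and empty inner lists, where A raises on every input except the degenerate empty-arrays-with-M=0 case, on which A happens never to compute a remainder and returns 0 while B's single final mod raises.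
-- outside the precondition, e.g. on maximizeIt([], 0): A returns 0, B raises ZeroDivisionError
import Mathlib
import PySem

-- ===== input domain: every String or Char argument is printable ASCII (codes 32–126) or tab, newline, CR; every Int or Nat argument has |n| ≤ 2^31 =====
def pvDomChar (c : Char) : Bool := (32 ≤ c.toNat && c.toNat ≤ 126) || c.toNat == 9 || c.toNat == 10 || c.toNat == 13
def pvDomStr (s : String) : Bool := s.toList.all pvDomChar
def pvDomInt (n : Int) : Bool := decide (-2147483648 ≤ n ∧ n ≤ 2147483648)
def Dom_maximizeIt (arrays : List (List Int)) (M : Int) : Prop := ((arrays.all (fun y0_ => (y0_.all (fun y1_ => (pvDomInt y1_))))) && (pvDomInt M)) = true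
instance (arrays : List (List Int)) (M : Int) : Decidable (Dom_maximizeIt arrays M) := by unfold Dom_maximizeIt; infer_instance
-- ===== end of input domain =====

-- B replaces A's remainder-set DP with a brute-force enumeration of all one-per-list sums,
-- taking the modulus once at the end (objective: alternative decomposition, not faster).
-- Both Pythons mutate `arrays` in place identically (squaring); the equivalence proved here
-- is about the RETURN value.

-- ===== PORT A =====
def func (x : Int) : Int := x ^ 2

-- new_reachable = set(); for r in reachable: for val in arr: new_reachable.add((r+val) % M)
def pvStepA (M : Int) (reachable : PySem.Set Int) (arr : List Int) : PySem.Set Int :=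
  reachable.foldl (fun nr r =>
    arr.foldl (fun nr val => PySem.Set.add nr (PySem.Int.mod (r + val) M)) nr)
    PySem.Set.empty

def maximizeIt (arrays : List (List Int)) (M : Int) : Int :=
  -- the in-place loop `arrays[idx] = list(map(func, arrays[idx]))` over range(len(arrays)),
  -- read back as the rebuilt list (return-value equivalence; mutation noted in the header)
  let arrays := arrays.map (fun a => a.map func)
  -- reachable = {0}; for arr in arrays: reachable = new_reachable
  let reachable : PySem.Set Int := arrays.foldl (pvStepA M) (PySem.Set.ofList [0])
  -- max(reachable); none = ValueError on an empty set, excluded by Pre_ (max is order-independent)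
  (PySem.List.max? reachable (fun x => x)).getD 0

-- ===== PORT B =====
def maximizeIt_alt (arrays : List (List Int)) (M : Int) : Int :=
  -- for idx in range(len(arrays)): arrays[idx] = [x * x for x in arrays[idx]]
  let arrays := arrays.map (fun a => a.map (fun x => x * x))
  -- sums = [0]; for arr in arrays: sums = [s + v for s in sums for v in arr]
  let sums : List Int := arrays.foldl (fun sums arr => sums.flatMap (fun s => arr.map (fun v => s + v))) [0]
  -- max(x % M for x in sums); none = ValueError on an empty iterator, excluded by Pre_
  (PySem.List.max? (sums.map (fun x => PySem.Int.mod x M)) (fun x => x)).getD 0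

-- ===== PRECONDITION & SPEC =====
-- Pre_ excludes M = 0 (ZeroDivisionError) and empty inner lists (max() of an empty set raises
-- ValueError); B raises on all of these too, except ([], 0), where A never computes a remainder
-- and returns 0 while B's single final mod raises.
def Pre_maximizeIt (arrays : List (List Int)) (M : Int) : Prop :=
  M ≠ 0 ∧ ∀ arr ∈ arrays, arr ≠ []
instance (arrays : List (List Int)) (M : Int) : Decidable (Pre_maximizeIt arrays M) := by
  unfold Pre_maximizeIt; infer_instance

def pvWitness_maximizeIt : List (List Int) × Int := ([[1, 2], [3]], 5)

def Spec_maximizeIt (arrays : List (List Int)) (M : Int) (out : Int) : Prop := out = maximizeIt_alt arrays M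
instance (arrays : List (List Int)) (M : Int) (out : Int) : Decidable (Spec_maximizeIt arrays M out) := by unfold Spec_maximizeIt; infer_instance

-- ===== CLAIM (what is proved, stated in full; the proofs are below) =====
def Claim_equal_maximizeIt : Prop := ∀ (arrays : List (List Int)) (M : Int), Dom_maximizeIt arrays M → Pre_maximizeIt arrays M → Spec_maximizeIt arrays M (maximizeIt arrays M)

-- ===== LEMMAS AND PROOFS =====

-- Python's %: reducing the left summand first does not change the remainder.
theorem pv_mod_add_left (a b M : Int) :
    PySem.Int.mod (PySem.Int.mod a M + b) M = PySem.Int.mod (a + b) M := by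
  simp only [PySem.Int.mod]
  conv_lhs => rw [Int.fmod_def a M]
  have h : a - M * a.fdiv M + b = (a + b) + M * (-(a.fdiv M)) := by ring
  rw [h, Int.add_mul_fmod_self_left]

-- membership after the inner `for val in arr` loop
theorem pv_mem_inner (arr : List Int) (g : Int → Int) (nr : PySem.Set Int) (x : Int) :
    x ∈ arr.foldl (fun nr val => PySem.Set.add nr (g val)) nr ↔
      x ∈ nr ∨ ∃ v ∈ arr, x = g v := by
  induction arr generalizing nr with
  | nil => simp
  | cons a t ih =>
      simp only [List.foldl_cons, ih, PySem.Set.mem_add, List.mem_cons]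
      constructor
      · rintro (⟨h | h⟩ | ⟨v, hv, hx⟩)
        · exact Or.inl h
        · exact Or.inr ⟨a, Or.inl rfl, h.symm ▸ rfl⟩
        · exact Or.inr ⟨v, Or.inr hv, hx⟩
      · rintro (h | ⟨v, (rfl | hv), hx⟩)
        · exact Or.inl (Or.inl h)
        · exact Or.inl (Or.inr hx)
        · exact Or.inr ⟨v, hv, hx⟩

-- membership after one DP step of A
theorem pv_mem_stepA (M : Int) (reach : PySem.Set Int) (arr : List Int) (x : Int) :
    x ∈ pvStepA M reach arr ↔ ∃ r ∈ reach, ∃ v ∈ arr, x = PySem.Int.mod (r + v) M := by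
  unfold pvStepA
  have key : ∀ (acc : PySem.Set Int),
      x ∈ reach.foldl (fun nr r =>
            arr.foldl (fun nr val => PySem.Set.add nr (PySem.Int.mod (r + val) M)) nr) acc ↔
        x ∈ acc ∨ ∃ r ∈ reach, ∃ v ∈ arr, x = PySem.Int.mod (r + v) M := by
    induction reach with
    | nil => simp
    | cons a t ih =>
        intro acc
        simp only [List.foldl_cons, ih, pv_mem_inner, List.mem_cons]
        constructor
        · rintro (⟨h | ⟨v, hv, hx⟩⟩ | ⟨r, hr, hrest⟩)
          · exact Or.inl h
          · exact Or.inr ⟨a, Or.inl rfl, v, hv, hx⟩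
          · exact Or.inr ⟨r, Or.inr hr, hrest⟩
        · rintro (h | ⟨r, (rfl | hr), hrest⟩)
          · exact Or.inl (Or.inl h)
          · exact Or.inl (Or.inr hrest)
          · exact Or.inr ⟨r, hr, hrest⟩
  simpa using key PySem.Set.empty

-- invariant: A's reachable set holds exactly the residues of B's sums
theorem pv_invariant (arrays : List (List Int)) (M : Int) (reach : PySem.Set Int)
    (sums : List Int)
    (h : ∀ x, x ∈ reach ↔ ∃ s ∈ sums, x = PySem.Int.mod s M) (x : Int) :
    x ∈ arrays.foldl (pvStepA M) reach ↔
      ∃ s ∈ arrays.foldl (fun sums arr => sums.flatMap (fun s => arr.map (fun v => s + v))) sums,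
        x = PySem.Int.mod s M := by
  induction arrays generalizing reach sums with
  | nil => simpa using h x
  | cons arr rest ih =>
      simp only [List.foldl_cons]
      refine ih _ _ (fun y => ?_)
      simp only [pv_mem_stepA, List.mem_flatMap, List.mem_map]
      constructor
      · rintro ⟨r, hr, v, hv, rfl⟩
        obtain ⟨s, hs, rfl⟩ := (h r).1 hr
        exact ⟨s + v, ⟨s, hs, v, hv, rfl⟩, pv_mod_add_left s v M⟩
      · rintro ⟨t, ⟨s, hs, v, hv, rfl⟩, rfl⟩
        exact ⟨PySem.Int.mod s M, (h _).2 ⟨s, hs, rfl⟩, v, hv, (pv_mod_add_left s v M).symm⟩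

-- B's sums list stays nonempty when every inner list is nonempty
theorem pv_sums_ne_nil (arrays : List (List Int)) (sums : List Int)
    (hs : sums ≠ []) (ha : ∀ arr ∈ arrays, arr ≠ []) :
    arrays.foldl (fun sums arr => sums.flatMap (fun s => arr.map (fun v => s + v))) sums ≠ [] := by
  induction arrays generalizing sums with
  | nil => simpa using hs
  | cons arr rest ih =>
      simp only [List.foldl_cons]
      refine ih _ ?_ (fun a h => ha a (List.mem_cons_of_mem _ h))
      obtain ⟨s, hs0⟩ := List.exists_mem_of_ne_nil _ hs
      obtain ⟨v, hv0⟩ := List.exists_mem_of_ne_nil _ (ha arr (List.mem_cons_self))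
      intro hnil
      have : s + v ∈ sums.flatMap (fun s => arr.map (fun v => s + v)) := by
        simp only [List.mem_flatMap, List.mem_map]; exact ⟨s, hs0, v, hv0, rfl⟩
      simp [hnil] at this

-- two nonempty Int lists with the same members have the same Python max()
theorem pv_max_congr (l₁ l₂ : List Int) (hmem : ∀ x, x ∈ l₁ ↔ x ∈ l₂) (h₂ : l₂ ≠ []) :
    (PySem.List.max? l₁ (fun x => x)).getD 0 = (PySem.List.max? l₂ (fun x => x)).getD 0 := by
  have h₁ : l₁ ≠ [] := by
    obtain ⟨y, hy⟩ := List.exists_mem_of_ne_nil _ h₂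
    intro hnil; rw [hnil] at hmem; exact (List.not_mem_nil ((hmem y).2 hy))
  obtain ⟨m₁, hm₁⟩ : ∃ m, PySem.List.max? l₁ (fun x => x) = some m := by
    cases hx : PySem.List.max? l₁ (fun x => x) with
    | none => exact absurd ((PySem.List.max?_eq_none_iff _ _).1 hx) h₁
    | some m => exact ⟨m, rfl⟩
  obtain ⟨m₂, hm₂⟩ : ∃ m, PySem.List.max? l₂ (fun x => x) = some m := by
    cases hx : PySem.List.max? l₂ (fun x => x) with
    | none => exact absurd ((PySem.List.max?_eq_none_iff _ _).1 hx) h₂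
    | some m => exact ⟨m, rfl⟩
  rw [hm₁, hm₂, Option.getD_some, Option.getD_some]
  exact le_antisymm
    (PySem.List.max?_isMax hm₂ m₁ ((hmem m₁).1 (PySem.List.max?_mem hm₁)))
    (PySem.List.max?_isMax hm₁ m₂ ((hmem m₂).2 (PySem.List.max?_mem hm₂)))

-- ===== VERDICT (by name: the statement is the Claim_ definition above) =====
theorem maximizeIt_spec : Claim_equal_maximizeIt := by
  intro arrays M _hDom hPre
  obtain ⟨_hM, hne⟩ := hPre  -- M ≠ 0 excludes Python's ZeroDivisionError; fmod is total in Lean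
  unfold Spec_maximizeIt maximizeIt maximizeIt_alt
  have hsq : arrays.map (fun a => a.map func) = arrays.map (fun a => a.map (fun x => x * x)) := by
    simp [func, pow_two]
  rw [hsq]
  set arrs := arrays.map (fun a => a.map (fun x => x * x)) with harrs
  have hne' : ∀ arr ∈ arrs, arr ≠ [] := by
    intro arr harr
    rw [harrs] at harr
    obtain ⟨a, ha, rfl⟩ := List.mem_map.1 harr
    simpa using hne a ha
  have hbase : ∀ x, x ∈ (PySem.Set.ofList [0] : PySem.Set Int) ↔
      ∃ s ∈ ([0] : List Int), x = PySem.Int.mod s M := by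
    intro x
    simp [PySem.Set.mem_ofList, PySem.Int.mod, Int.fmod_def]
  have hinv := pv_invariant arrs M (PySem.Set.ofList [0]) [0] hbase
  have hsumsne := pv_sums_ne_nil arrs [0] (by simp) hne'
  refine pv_max_congr _ _ (fun x => ?_) (by simpa using hsumsne)
  rw [hinv x]
  simp only [List.mem_map]
  constructor
  · rintro ⟨s, hs, rfl⟩; exact ⟨s, hs, rfl⟩
  · rintro ⟨s, hs, rfl⟩; exact ⟨s, hs, rfl⟩
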